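-- pv_equiv track=rewrite | github.com/Sum-Outman/Self | training/distributed_training.py | _create_hybrid_groups
-- ===== SOURCE A (Python) =====
-- from typing import Dict, Any, List, Optional, Tuple, Union, Callable, Set
--
-- def _create_hybrid_groups(total_gpus: int) -> Dict[str, List[List[int]]]:
--     """创建混合并行组
--
--     参数:
--         total_gpus: 总GPU数量
--
--     返回:
--         组配置字典
--     """
--     # 最小配置：至少2个GPU用于模型并行，至少2个GPU用于数据并行
--     if total_gpus < 4:
--         return {
--             'model_parallel': [list(range(total_gpus))],  # 所有GPU用于模型并行
--             'data_parallel': []  # 没有数据并行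
--         }
--
--     # 策略：将GPU分为模型并行组和数据并行组
--     # 模型并行组大小：2-4个GPU（取决于总GPU数）
--     model_group_size = min(4, total_gpus // 2)
--     if model_group_size < 2:
--         model_group_size = 2
--
--     # 数据并行组大小：剩余GPU
--     data_group_size = total_gpus // model_group_size
--
--     # 创建模型并行组
--     model_parallel_groups = []
--     for i in range(0, total_gpus, model_group_size):
--         group = list(range(i, min(i + model_group_size, total_gpus)))
--         if len(group) >= 2:  # 至少2个GPU才构成模型并行组
--             model_parallel_groups.append(group)
--
--     # 创建数据并行组（跨模型并行组）
--     data_parallel_groups = []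
--     if len(model_parallel_groups) > 1:
--         # 每个数据并行组包含每个模型并行组中的一个GPU
--         for pos in range(model_group_size):
--             group = []
--             for model_group in model_parallel_groups:
--                 if pos < len(model_group):
--                     group.append(model_group[pos])
--             if len(group) >= 2:  # 至少2个GPU才构成数据并行组
--                 data_parallel_groups.append(group)
--
--     return {
--         'model_parallel': model_parallel_groups,
--         'data_parallel': data_parallel_groups
--     }
-- ===== SOURCE B (Python) =====
-- def _create_hybrid_groups(total_gpus: int):
--     """Single-pass bucket scatter: each usable GPU index g is appended to its
--     model row bucket rows[g // size] and data column bucket cols[g % size] in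
--     one loop, instead of slicing strided ranges and then transposing."""
--     if total_gpus < 4:
--         return {'model_parallel': [list(range(total_gpus))], 'data_parallel': []}
--     size = min(4, total_gpus // 2)
--     # a trailing remainder of exactly 1 GPU cannot form a group: drop it
--     usable = total_gpus - (1 if total_gpus % size == 1 else 0)
--     rows = [[] for _ in range((usable + size - 1) // size)]
--     cols = [[] for _ in range(size)]
--     for g in range(usable):
--         rows[g // size].append(g)
--         cols[g % size].append(g)
--     data = [c for c in cols if len(c) >= 2] if len(rows) > 1 else []
--     return {'model_parallel': rows, 'data_parallel': data}
-- ===== Notes on version B (the rewrite author's own statement) =====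
-- stated objective: alternative
-- what changed: B makes one scatter pass over the usable GPU indices, appending each index g to its model-row bucket rows[g // size] and data-column bucket cols[g % size] simultaneously, instead of A's staged construction that slices strided ranges into rows and then transposes the filtered row list with a nested loop.
import Mathlib
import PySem

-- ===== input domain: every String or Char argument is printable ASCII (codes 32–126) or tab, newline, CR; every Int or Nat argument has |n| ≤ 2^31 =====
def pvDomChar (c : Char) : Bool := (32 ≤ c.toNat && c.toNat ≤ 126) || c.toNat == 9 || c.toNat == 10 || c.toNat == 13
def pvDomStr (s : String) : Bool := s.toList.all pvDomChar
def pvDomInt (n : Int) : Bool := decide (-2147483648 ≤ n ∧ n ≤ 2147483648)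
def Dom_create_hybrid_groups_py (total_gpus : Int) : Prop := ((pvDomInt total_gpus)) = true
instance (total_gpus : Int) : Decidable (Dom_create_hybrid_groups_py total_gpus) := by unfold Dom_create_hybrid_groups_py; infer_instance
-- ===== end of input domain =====

-- B makes ONE scatter pass over the usable GPU indices, appending each index g to its
-- model-row bucket rows[g // size] and data-column bucket cols[g % size] simultaneously,
-- instead of A's staged slicing of strided ranges followed by a nested transposition loop
-- (objective: alternative, same cost).

-- ===== PORT A =====
def create_hybrid_groups_py (total_gpus : Int) : List (String × List (List Int)) :=
  if total_gpus < 4 then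
    [("model_parallel", [PySem.List.pyRange 0 total_gpus 1]), ("data_parallel", ([] : List (List Int)))]
  else
    let mgs0 := min 4 (PySem.Int.floordiv total_gpus 2)
    let model_group_size := if mgs0 < 2 then 2 else mgs0
    let _data_group_size := PySem.Int.floordiv total_gpus model_group_size
    let model_parallel_groups :=
      (PySem.List.pyRange 0 total_gpus model_group_size).foldl (fun acc i =>
        let group := PySem.List.pyRange i (min (i + model_group_size) total_gpus) 1
        if 2 ≤ PySem.List.len group then acc ++ [group] else acc) []
    let data_parallel_groups :=
      if 1 < PySem.List.len model_parallel_groups then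
        (PySem.List.pyRange 0 model_group_size 1).foldl (fun acc pos =>
          let group := model_parallel_groups.foldl (fun g mg =>
            if pos < PySem.List.len mg then g ++ [PySem.List.pyGetD mg pos 0] else g) []
          if 2 ≤ PySem.List.len group then acc ++ [group] else acc) []
      else ([] : List (List Int))
    [("model_parallel", model_parallel_groups), ("data_parallel", data_parallel_groups)]

-- ===== PORT B =====
def create_hybrid_groups_py_alt (total_gpus : Int) : List (String × List (List Int)) :=
  if total_gpus < 4 then
    [("model_parallel", [PySem.List.pyRange 0 total_gpus 1]), ("data_parallel", ([] : List (List Int)))]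
  else
    let size := min 4 (PySem.Int.floordiv total_gpus 2)
    -- a trailing remainder of exactly 1 GPU cannot form a group: drop it
    let usable := total_gpus - (if PySem.Int.mod total_gpus size = 1 then 1 else 0)
    let rows0 : List (List Int) :=
      List.replicate (PySem.Int.floordiv (usable + size - 1) size).toNat []
    let cols0 : List (List Int) := List.replicate size.toNat []
    let rc := (PySem.List.pyRange 0 usable 1).foldl
      (fun (rc : List (List Int) × List (List Int)) g =>
        (rc.1.modify (PySem.Int.floordiv g size).toNat (· ++ [g]),
         rc.2.modify (PySem.Int.mod g size).toNat (· ++ [g])))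
      (rows0, cols0)
    let data :=
      if 1 < PySem.List.len rc.1 then rc.2.filter (fun c => 2 ≤ PySem.List.len c)
      else ([] : List (List Int))
    [("model_parallel", rc.1), ("data_parallel", data)]

-- ===== PRECONDITION & SPEC =====
def Spec_create_hybrid_groups_py (total_gpus : Int) (out : List (String × List (List Int))) : Prop := out = create_hybrid_groups_py_alt total_gpus
instance (total_gpus : Int) (out : List (String × List (List Int))) : Decidable (Spec_create_hybrid_groups_py total_gpus out) := by unfold Spec_create_hybrid_groups_py; infer_instance

-- ===== CLAIM (what is proved, stated in full; the proofs are below) =====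
def Claim_equal_create_hybrid_groups_py : Prop := ∀ (total_gpus : Int), Dom_create_hybrid_groups_py total_gpus → Spec_create_hybrid_groups_py total_gpus (create_hybrid_groups_py total_gpus)

-- ===== LEMMAS AND PROOFS =====

-- closed-form description of the grouping; both ports are proved equal to it
def cfHybrid (total_gpus : Int) : List (String × List (List Int)) :=
  if total_gpus < 4 then
    [("model_parallel", [PySem.List.pyRange 0 total_gpus 1]), ("data_parallel", ([] : List (List Int)))]
  else
    let size := min 4 (PySem.Int.floordiv total_gpus 2)
    let full := PySem.Int.floordiv total_gpus size
    let rem := PySem.Int.mod total_gpus size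
    let model0 := (PySem.List.pyRange 0 full 1).map (fun r => PySem.List.pyRange (r * size) ((r + 1) * size) 1)
    let model := if 2 ≤ rem then model0 ++ [PySem.List.pyRange (full * size) total_gpus 1] else model0
    let data :=
      if 1 < full + (if 2 ≤ rem then 1 else 0) then
        ((PySem.List.pyRange 0 size 1).filter (fun pos =>
            decide (2 ≤ full + (if 2 ≤ rem ∧ pos < rem then (1 : Int) else 0)))).map (fun pos =>
          (PySem.List.pyRange 0 full 1).map (fun r => r * size + pos) ++
            (if 2 ≤ rem ∧ pos < rem then [full * size + pos] else []))
      else ([] : List (List Int))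
    [("model_parallel", model), ("data_parallel", data)]

theorem a_eq_cf (n : Int) : create_hybrid_groups_py n = cfHybrid n := by
  by_cases h4 : n < 4
  · simp only [create_hybrid_groups_py, cfHybrid, if_pos h4]
  · simp only [create_hybrid_groups_py, cfHybrid, if_neg h4]
    rw [PySem.Int.floordiv_eq_ediv_of_pos (by norm_num : (0:Int) < 2)]
    have h2s : 2 ≤ min 4 (n/2) := le_min (by norm_num) (by omega)
    rw [if_neg (by omega : ¬ min 4 (n/2) < 2)]
    set s := min 4 (n/2) with hsdef
    rw [PySem.Int.floordiv_eq_ediv_of_pos (by omega : (0:Int) < s),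
        PySem.Int.mod_eq_emod_of_pos (by omega : (0:Int) < s)]
    have hsle : 2*s ≤ n := by have := min_le_right 4 (n/2); omega
    set full := n/s with hfdef
    set rem := n%s with hrdef
    have hid : s*full + rem = n := Int.mul_ediv_add_emod n s
    have hr0 : 0 ≤ rem := Int.emod_nonneg n (by omega)
    have hrs : rem < s := Int.emod_lt_of_pos n (by omega)
    have hfull2 : 2 ≤ full := by rw [hfdef, Int.le_ediv_iff_mul_le (by omega)]; omega
    have hq : (n - 0 + s - 1)/s = full + (if 0 < rem then 1 else 0) := by
      have hrw : n - 0 + s - 1 = (rem + s - 1) + s * full := by omega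
      rw [hrw, Int.add_mul_ediv_left _ _ (by omega : s ≠ 0)]
      by_cases hp : 0 < rem
      · have hrw2 : rem + s - 1 = (rem - 1) + s * 1 := by omega
        rw [hrw2, Int.add_mul_ediv_left _ _ (by omega : s ≠ 0),
            Int.ediv_eq_zero_of_lt (by omega) (by omega), if_pos hp]
        omega
      · rw [Int.ediv_eq_zero_of_lt (by omega) (by omega), if_neg hp]
        omega
    have hL1 : PySem.List.pyRange 0 n s
        = ((List.range full.toNat).map (fun k : Nat => s * (k : Int))) ++ (if 0 < rem then [s * full] else []) := by
      rw [PySem.List.pyRange_of_pos 0 n (by omega), if_pos (by omega : (0:Int) < n), hq]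
      by_cases hp : 0 < rem
      · rw [if_pos hp, if_pos hp]
        have : (full + 1).toNat = full.toNat + 1 := by omega
        rw [this, List.range_succ, List.map_append]
        congr 1
        · exact List.map_congr_left (fun k _ => by ring)
        · simp [Int.toNat_of_nonneg (by omega : (0:Int) ≤ full)]
      · rw [if_neg hp, if_neg hp, List.append_nil, add_zero]
        exact List.map_congr_left (fun k _ => by ring)
    have hfoldA := PySem.List.foldl_append_if
      (fun i => decide (2 ≤ PySem.List.len (PySem.List.pyRange i (min (i + s) n) 1)))
      (fun i => PySem.List.pyRange i (min (i + s) n) 1)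
      (PySem.List.pyRange 0 n s) []
    simp only [decide_eq_true_eq, List.nil_append] at hfoldA
    rw [hfoldA, hL1]
    simp only [List.filter_append, List.filter_map, List.map_append, List.map_map]
    have hlen1 : ∀ a b : Int, PySem.List.len (PySem.List.pyRange a b 1) = ((b - a).toNat : Int) := by
      intro a b; simp [PySem.List.len_eq, PySem.List.length_pyRange_one]
    have hminfull : ∀ k : Nat, k < full.toNat → min (s * (k:Int) + s) n = s * k + s := by
      intro k hk
      have h2 : s * ((k:Int) + 1) ≤ s * full := mul_le_mul_of_nonneg_left (by omega) (by omega)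
      rw [mul_add, mul_one] at h2
      exact min_eq_left (by omega)
    have hfiltA : List.filter
        ((fun i => decide (2 ≤ PySem.List.len (PySem.List.pyRange i (min (i + s) n) 1))) ∘ fun k : Nat => s * (k:Int))
        (List.range full.toNat) = List.range full.toNat := by
      rw [List.filter_congr (q := fun _ => true), List.filter_true]
      intro k hk
      simp only [Function.comp, hlen1, hminfull k (List.mem_range.mp hk), decide_eq_true_eq]
      have hsk : s * (k:Int) + s - s * k = s := by ring
      rw [hsk]
      omega
    rw [hfiltA]
    have hmapA : List.map ((fun i => PySem.List.pyRange i (min (i + s) n) 1) ∘ fun k : Nat => s * (k:Int))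
        (List.range full.toNat)
        = List.map (fun k : Nat => PySem.List.pyRange (s * (k:Int)) (s * k + s) 1) (List.range full.toNat) :=
      List.map_congr_left (fun k hk => by
        simp only [Function.comp, hminfull k (List.mem_range.mp hk)])
    rw [hmapA]
    have hmin2 : min (s * full + s) n = n := min_eq_right (by omega)
    have htail2 : List.map (fun i => PySem.List.pyRange i (min (i + s) n) 1)
        (List.filter (fun i => decide (2 ≤ PySem.List.len (PySem.List.pyRange i (min (i + s) n) 1)))
          (if 0 < rem then [s * full] else []))
        = (if 2 ≤ rem then [PySem.List.pyRange (s * full) n 1] else []) := by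
      have hlenv : PySem.List.len (PySem.List.pyRange (s * full) (min (s * full + s) n) 1) = (rem.toNat : Int) := by
        rw [hmin2, hlen1]
        congr 1
        omega
      by_cases h2r : 2 ≤ rem
      · rw [if_pos (by omega : (0:Int) < rem), if_pos h2r]
        rw [List.filter_cons_of_pos (by rw [hlenv]; simp only [decide_eq_true_eq]; omega)]
        simp only [List.filter_nil, List.map_cons, List.map_nil, hmin2]
      · by_cases hp : 0 < rem
        · rw [if_pos hp, if_neg h2r]
          rw [List.filter_cons_of_neg (by rw [hlenv]; simp only [decide_eq_true_eq]; omega)]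
          simp
        · rw [if_neg hp, if_neg h2r]
          simp
    rw [htail2]
    have hBmap : List.map (fun r => PySem.List.pyRange (r * s) ((r + 1) * s) 1) (PySem.List.pyRange 0 full 1)
        = List.map (fun k : Nat => PySem.List.pyRange (s * (k:Int)) (s * k + s) 1) (List.range full.toNat) := by
      rw [PySem.List.pyRange_one, List.map_map]
      rw [show (full - 0).toNat = full.toNat from by omega]
      refine List.map_congr_left (fun k hk => ?_)
      simp only [Function.comp]
      rw [show (0 + (k:Int)) * s = s * k from by ring, show (0 + (k:Int) + 1) * s = s * k + s from by ring]
    rw [hBmap, mul_comm full s]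
    by_cases h2r : 2 ≤ rem
    · simp only [h2r, true_and, if_true]
      have hgA : (1:Int) < PySem.List.len
          (List.map (fun k : Nat => PySem.List.pyRange (s * (k:Int)) (s * k + s) 1) (List.range full.toNat)
            ++ [PySem.List.pyRange (s * full) n 1]) := by
        simp [PySem.List.len_eq]
        omega
      rw [if_pos hgA, if_pos (show (1:Int) < full + (1:Int) from by omega)]
      have hfoldD := PySem.List.foldl_append_if
        (fun pos => decide (2 ≤ PySem.List.len ((fun pos => List.foldl (fun g mg => if pos < PySem.List.len mg then g ++ [PySem.List.pyGetD mg pos 0] else g) [] (List.map (fun k : Nat => PySem.List.pyRange (s * (k:Int)) (s * k + s) 1) (List.range full.toNat) ++ [PySem.List.pyRange (s * full) n 1])) pos)))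
        (fun pos => List.foldl (fun g mg => if pos < PySem.List.len mg then g ++ [PySem.List.pyGetD mg pos 0] else g) [] (List.map (fun k : Nat => PySem.List.pyRange (s * (k:Int)) (s * k + s) 1) (List.range full.toNat) ++ [PySem.List.pyRange (s * full) n 1]))
        (PySem.List.pyRange 0 s 1) []
      simp only [decide_eq_true_eq, List.nil_append] at hfoldD
      rw [hfoldD]
      have hinner : ∀ pos : Int, 0 ≤ pos → pos < s →
          List.foldl (fun g mg => if pos < PySem.List.len mg then g ++ [PySem.List.pyGetD mg pos 0] else g) [] (List.map (fun k : Nat => PySem.List.pyRange (s * (k:Int)) (s * k + s) 1) (List.range full.toNat) ++ [PySem.List.pyRange (s * full) n 1])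
          = List.map (fun k : Nat => s * (k:Int) + pos) (List.range full.toNat)
            ++ (if pos < rem then [s * full + pos] else []) := by
        intro pos h0 hlt
        have hf := PySem.List.foldl_append_if
          (fun mg => decide (pos < PySem.List.len mg))
          (fun mg => PySem.List.pyGetD mg pos 0)
          (List.map (fun k : Nat => PySem.List.pyRange (s * (k:Int)) (s * k + s) 1) (List.range full.toNat)
            ++ [PySem.List.pyRange (s * full) n 1]) []
        simp only [decide_eq_true_eq, List.nil_append] at hf
        rw [hf, List.filter_append, List.map_append]
        have hlent : PySem.List.len (PySem.List.pyRange (s * full) n 1) = (rem.toNat : Int) := by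
          rw [hlen1]; congr 1; omega
        congr 1
        · rw [List.filter_map]
          rw [List.filter_congr (q := fun _ => true) (fun k hk => by
              simp only [Function.comp, hlen1, decide_eq_true_eq]
              have hsk : s * (k:Int) + s - s * k = s := by ring
              rw [hsk]
              omega), List.filter_true, List.map_map]
          refine List.map_congr_left (fun k hk => ?_)
          simp only [Function.comp]
          rw [PySem.List.pyGetD_eq_getElem _ 0 h0 (by
              rw [PySem.List.length_pyRange_one]
              have hsk : s * (k:Int) + s - s * k = s := by ring
              rw [hsk]
              omega)]
          rw [PySem.List.getElem_pyRange_one, Int.toNat_of_nonneg h0]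
        · by_cases hpr : pos < rem
          · rw [List.filter_cons_of_pos (by simp only [decide_eq_true_eq, hlent]; omega), if_pos hpr]
            simp only [List.filter_nil, List.map_cons, List.map_nil]
            congr 1
            rw [PySem.List.pyGetD_eq_getElem _ 0 h0 (by rw [PySem.List.length_pyRange_one]; omega)]
            rw [PySem.List.getElem_pyRange_one, Int.toNat_of_nonneg h0]
          · rw [List.filter_cons_of_neg (by simp only [decide_eq_true_eq, hlent]; omega), if_neg hpr]
            simp
      rw [List.filter_congr (q := fun _ => true) (fun pos hmem => by
            obtain ⟨hp0, hps⟩ := (PySem.List.mem_pyRange_one).mp hmem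
            simp only [hinner pos hp0 hps, decide_eq_true_eq]
            simp only [PySem.List.len_eq, List.length_append, List.length_map, List.length_range]
            split_ifs <;> simp <;> omega), List.filter_true]
      rw [List.filter_congr (q := fun _ => true) (fun pos hmem => by
            simp only [decide_eq_true_eq]
            split_ifs <;> omega), List.filter_true]
      refine congrArg (fun l => [("model_parallel",
        List.map (fun k : Nat => PySem.List.pyRange (s * (k:Int)) (s * k + s) 1) (List.range full.toNat)
          ++ [PySem.List.pyRange (s * full) n 1]), ("data_parallel", l)]) ?_
      refine List.map_congr_left (fun pos hmem => ?_)
      obtain ⟨hp0, hps⟩ := (PySem.List.mem_pyRange_one).mp hmem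
      rw [hinner pos hp0 hps]
      congr 1
      rw [PySem.List.pyRange_one, List.map_map, show (full - 0).toNat = full.toNat from by omega]
      refine (List.map_congr_left (fun k hk => ?_)).symm
      simp only [Function.comp]
      ring
    · simp only [h2r, false_and, if_false, List.append_nil]
      have hgA : (1:Int) < PySem.List.len
          (List.map (fun k : Nat => PySem.List.pyRange (s * (k:Int)) (s * k + s) 1) (List.range full.toNat)) := by
        simp [PySem.List.len_eq]
        omega
      rw [if_pos hgA, if_pos (show (1:Int) < full + (0:Int) from by omega)]
      have hfoldD := PySem.List.foldl_append_if
        (fun pos => decide (2 ≤ PySem.List.len (List.foldl (fun g mg => if pos < PySem.List.len mg then g ++ [PySem.List.pyGetD mg pos 0] else g) [] (List.map (fun k : Nat => PySem.List.pyRange (s * (k:Int)) (s * k + s) 1) (List.range full.toNat)))))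
        (fun pos => List.foldl (fun g mg => if pos < PySem.List.len mg then g ++ [PySem.List.pyGetD mg pos 0] else g) [] (List.map (fun k : Nat => PySem.List.pyRange (s * (k:Int)) (s * k + s) 1) (List.range full.toNat)))
        (PySem.List.pyRange 0 s 1) []
      simp only [decide_eq_true_eq, List.nil_append] at hfoldD
      rw [hfoldD]
      have hinner : ∀ pos : Int, 0 ≤ pos → pos < s →
          List.foldl (fun g mg => if pos < PySem.List.len mg then g ++ [PySem.List.pyGetD mg pos 0] else g) [] (List.map (fun k : Nat => PySem.List.pyRange (s * (k:Int)) (s * k + s) 1) (List.range full.toNat))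
          = List.map (fun k : Nat => s * (k:Int) + pos) (List.range full.toNat) := by
        intro pos h0 hlt
        have hf := PySem.List.foldl_append_if
          (fun mg => decide (pos < PySem.List.len mg))
          (fun mg => PySem.List.pyGetD mg pos 0)
          (List.map (fun k : Nat => PySem.List.pyRange (s * (k:Int)) (s * k + s) 1) (List.range full.toNat)) []
        simp only [decide_eq_true_eq, List.nil_append] at hf
        rw [hf, List.filter_map]
        rw [List.filter_congr (q := fun _ => true) (fun k hk => by
            simp only [Function.comp, hlen1, decide_eq_true_eq]
            have hsk : s * (k:Int) + s - s * k = s := by ring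
            rw [hsk]
            omega), List.filter_true, List.map_map]
        refine List.map_congr_left (fun k hk => ?_)
        simp only [Function.comp]
        rw [PySem.List.pyGetD_eq_getElem _ 0 h0 (by
            rw [PySem.List.length_pyRange_one]
            have hsk : s * (k:Int) + s - s * k = s := by ring
            rw [hsk]
            omega)]
        rw [PySem.List.getElem_pyRange_one, Int.toNat_of_nonneg h0]
      rw [List.filter_congr (q := fun _ => true) (fun pos hmem => by
            obtain ⟨hp0, hps⟩ := (PySem.List.mem_pyRange_one).mp hmem
            simp only [hinner pos hp0 hps, decide_eq_true_eq]
            simp only [PySem.List.len_eq, List.length_map, List.length_range]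
            omega), List.filter_true]
      rw [List.filter_congr (q := fun _ => true) (fun pos hmem => by
            simp only [decide_eq_true_eq]
            omega), List.filter_true]
      refine congrArg (fun l => [("model_parallel",
        List.map (fun k : Nat => PySem.List.pyRange (s * (k:Int)) (s * k + s) 1) (List.range full.toNat)),
        ("data_parallel", l)]) ?_
      refine List.map_congr_left (fun pos hmem => ?_)
      obtain ⟨hp0, hps⟩ := (PySem.List.mem_pyRange_one).mp hmem
      rw [hinner pos hp0 hps]
      rw [PySem.List.pyRange_one, List.map_map, show (full - 0).toNat = full.toNat from by omega]
      refine (List.map_congr_left (fun k hk => ?_)).symm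
      simp only [Function.comp]
      ring

-- bucket contents after scanning the first M indices
def rowsAt (S NR M : Nat) : List (List Int) :=
  (List.range NR).map (fun r => ((List.range M).filter (fun g => g / S == r)).map (fun g => Int.ofNat g))
def colsAt (S M : Nat) : List (List Int) :=
  (List.range S).map (fun p => ((List.range M).filter (fun g => g % S == p)).map (fun g => Int.ofNat g))

theorem modify_map_range {α : Type} (f : Nat → α) (g : α → α) (i N : Nat) :
    (((List.range N).map f).modify i g) = (List.range N).map (fun r => if r = i then g (f r) else f r) := by
  apply List.ext_getElem
  · simp [List.length_modify]
  · intro j h1 h2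
    simp only [List.length_modify, List.length_map, List.length_range] at h1
    rw [List.getElem_modify]
    simp only [List.getElem_map, List.getElem_range]
    split_ifs with h h' h'
    · rfl
    · exact absurd h.symm h'
    · exact absurd h'.symm h
    · rfl

theorem filter_range_eq (t p : Nat) :
    (List.range t).filter (fun g => g == p) = if p < t then [p] else [] := by
  induction t with
  | zero => simp
  | succ t ih =>
    rw [List.range_succ, List.filter_append, ih]
    by_cases h : t = p
    · subst h
      simp
    · have : (List.filter (fun g => g == p) [t]) = [] := by simp [h]
      rw [this, List.append_nil]
      by_cases h2 : p < t
      · rw [if_pos h2, if_pos (by omega)]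
      · rw [if_neg h2, if_neg (by omega)]

theorem filter_div_block (S : Nat) (hS : 0 < S) (a t r : Nat) (ht : t ≤ S) :
    (List.range (a * S + t)).filter (fun g => g / S == r) =
      if r < a then (List.range S).map (fun j => r * S + j)
      else if r = a then (List.range t).map (fun j => r * S + j)
      else [] := by
  induction a generalizing r with
  | zero =>
    have hall : ∀ g ∈ List.range (0 * S + t), (g / S == r) = (decide (0 = r)) := by
      intro g hg
      rw [List.mem_range] at hg
      have hg0 : g / S = 0 := Nat.div_eq_of_lt (by omega)
      rw [hg0]
      cases r <;> simp
    rw [List.filter_congr hall]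
    by_cases h0 : r = 0
    · subst h0
      rw [if_neg (by omega : ¬ (0:Nat) < 0), if_pos rfl]
      have hid : (fun j : Nat => 0 * S + j) = fun j => j := funext fun j => by omega
      rw [hid, List.map_id']
      simp
    · simp [Ne.symm h0, h0]
  | succ a ih =>
    rw [show (a + 1) * S + t = S + (a * S + t) from by ring, List.range_add,
        List.filter_append, List.filter_map]
    have hpre : (List.range S).filter (fun g => g / S == r) =
        if r = 0 then List.range S else [] := by
      have hall : ∀ g ∈ List.range S, (g / S == r) = (decide (0 = r)) := by
        intro g hg
        rw [List.mem_range] at hg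
        rw [Nat.div_eq_of_lt hg]
        cases r <;> simp
      rw [List.filter_congr hall]
      by_cases h0 : r = 0
      · simp [h0]
      · simp [Ne.symm h0, h0]
    rw [hpre]
    rcases r with _ | r'
    · have hsuf : (List.range (a * S + t)).filter ((fun g => g / S == 0) ∘ fun x => S + x) = [] := by
        rw [List.filter_congr (q := fun _ => false), List.filter_false]
        intro g hg
        simp only [Function.comp]
        have hd : (S + g) / S = g / S + 1 := by
          rw [Nat.add_comm S g, Nat.add_div_right _ hS]
        simp [hd]
      rw [hsuf]
      rw [if_pos rfl, List.map_nil, List.append_nil, if_pos (by omega : (0:Nat) < a + 1)]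
      have hid : (fun j : Nat => 0 * S + j) = fun j => j := funext fun j => by omega
      rw [hid, List.map_id']
    · have hsuf : (List.range (a * S + t)).filter ((fun g => g / S == r' + 1) ∘ fun x => S + x) =
          (List.range (a * S + t)).filter (fun g => g / S == r') := by
        apply List.filter_congr
        intro g hg
        simp only [Function.comp]
        have hd : (S + g) / S = g / S + 1 := by
          rw [Nat.add_comm S g, Nat.add_div_right _ hS]
        rw [hd]
        by_cases h : g / S = r' <;> simp [h]
      rw [hsuf, ih r']
      simp only [if_neg (by omega : ¬ r' + 1 = 0), List.nil_append]
      by_cases h1 : r' < a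
      · rw [if_pos h1, if_pos (by omega), List.map_map]
        exact List.map_congr_left (fun j _ => by simp only [Function.comp]; ring)
      · by_cases h2 : r' = a
        · rw [if_neg h1, if_pos h2, if_neg (by omega), if_pos (by omega), List.map_map]
          exact List.map_congr_left (fun j _ => by simp only [Function.comp]; ring)
        · rw [if_neg h1, if_neg h2, List.map_nil, if_neg (by omega), if_neg (by omega)]

theorem filter_mod_block (S : Nat) (a t p : Nat) (ht : t ≤ S) (hp : p < S) :
    (List.range (a * S + t)).filter (fun g => g % S == p) =
      (List.range (a + if p < t then 1 else 0)).map (fun k => k * S + p) := by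
  induction a with
  | zero =>
    have hall : ∀ g ∈ List.range (0 * S + t), (g % S == p) = (g == p) := by
      intro g hg
      rw [List.mem_range] at hg
      rw [Nat.mod_eq_of_lt (by omega)]
    rw [List.filter_congr hall, show 0 * S + t = t from by ring, filter_range_eq]
    by_cases h : p < t
    · simp [h]
    · simp [h]
  | succ a ih =>
    rw [show (a + 1) * S + t = S + (a * S + t) from by ring, List.range_add,
        List.filter_append, List.filter_map]
    have hpre : (List.range S).filter (fun g => g % S == p) = [p] := by
      have hall : ∀ g ∈ List.range S, (g % S == p) = (g == p) := by
        intro g hg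
        rw [List.mem_range] at hg
        rw [Nat.mod_eq_of_lt hg]
      rw [List.filter_congr hall, filter_range_eq, if_pos hp]
    have hsuf : (List.range (a * S + t)).filter ((fun g => g % S == p) ∘ fun x => S + x) =
        (List.range (a * S + t)).filter (fun g => g % S == p) := by
      apply List.filter_congr
      intro g hg
      simp only [Function.comp]
      rw [Nat.add_mod_left]
    rw [hpre, hsuf, ih,
        show a + 1 + (if p < t then 1 else 0) = (a + if p < t then 1 else 0) + 1 from by omega,
        List.range_succ_eq_map, List.map_cons, List.map_map, List.map_map]
    simp only [Nat.zero_mul, Nat.zero_add, List.singleton_append]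
    congr 1
    exact (List.map_congr_left (fun k _ => by
      simp only [Function.comp, Nat.succ_eq_add_one]; ring)).symm

theorem fold_buckets (S : Nat) (NR M : Nat) :
    (PySem.List.pyRange 0 (M : Int) 1).foldl
      (fun (rc : List (List Int) × List (List Int)) g =>
        (rc.1.modify (PySem.Int.floordiv g (S : Int)).toNat (· ++ [g]),
         rc.2.modify (PySem.Int.mod g (S : Int)).toNat (· ++ [g])))
      (List.replicate NR ([] : List Int), List.replicate S ([] : List Int))
    = (rowsAt S NR M, colsAt S M) := by
  induction M with
  | zero =>
    rw [PySem.List.pyRange_one_eq_nil (by omega), List.foldl_nil]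
    unfold rowsAt colsAt
    simp
  | succ M ih =>
    rw [show ((M + 1 : Nat) : Int) = (M : Int) + 1 from by push_cast; ring,
        PySem.List.pyRange_one_succ_right (by omega), List.foldl_append, ih,
        List.foldl_cons, List.foldl_nil]
    have hdiv : (PySem.Int.floordiv (M : Int) (S : Int)).toNat = M / S := by
      rw [PySem.Int.floordiv_natCast]
      exact Int.toNat_natCast _
    have hmod : (PySem.Int.mod (M : Int) (S : Int)).toNat = M % S := by
      rw [PySem.Int.mod_natCast]
      exact Int.toNat_natCast _
    refine Prod.ext ?_ ?_
    · show (rowsAt S NR M).modify (PySem.Int.floordiv (M:Int) (S:Int)).toNat (· ++ [(M:Int)]) = rowsAt S NR (M+1)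
      rw [hdiv]
      unfold rowsAt
      rw [modify_map_range]
      apply List.map_congr_left
      intro r _
      rw [List.range_succ, List.filter_append]
      by_cases h : r = M / S
      · rw [if_pos h, List.map_append]
        congr 1
        subst h
        simp
      · rw [if_neg h]
        have : (List.filter (fun g => g / S == r) [M]) = [] := by
          simp [Ne.symm h]
        rw [this, List.append_nil]
    · show (colsAt S M).modify (PySem.Int.mod (M:Int) (S:Int)).toNat (· ++ [(M:Int)]) = colsAt S (M+1)
      rw [hmod]
      unfold colsAt
      rw [modify_map_range]
      apply List.map_congr_left
      intro p _
      rw [List.range_succ, List.filter_append]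
      by_cases h : p = M % S
      · rw [if_pos h, List.map_append]
        congr 1
        subst h
        simp
      · rw [if_neg h]
        have : (List.filter (fun g => g % S == p) [M]) = [] := by
          simp [Ne.symm h]
        rw [this, List.append_nil]

theorem b_eq_cf (n : Int) : create_hybrid_groups_py_alt n = cfHybrid n := by
  by_cases h4 : n < 4
  · simp only [create_hybrid_groups_py_alt, cfHybrid, if_pos h4]
  · simp only [create_hybrid_groups_py_alt, cfHybrid, if_neg h4]
    rw [PySem.Int.floordiv_eq_ediv_of_pos (by norm_num : (0:Int) < 2)]
    have h2s : 2 ≤ min 4 (n/2) := le_min (by norm_num) (by omega)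
    set s := min 4 (n/2) with hsdef
    rw [show PySem.Int.floordiv n s = n/s from PySem.Int.floordiv_eq_ediv_of_pos (by omega),
        show PySem.Int.mod n s = n%s from PySem.Int.mod_eq_emod_of_pos (by omega)]
    have hsle : 2*s ≤ n := by have := min_le_right 4 (n/2); omega
    set full := n/s with hfdef
    set rem := n%s with hrdef
    have hid : s*full + rem = n := Int.mul_ediv_add_emod n s
    have hr0 : 0 ≤ rem := Int.emod_nonneg n (by omega)
    have hrs : rem < s := Int.emod_lt_of_pos n (by omega)
    have hfull2 : 2 ≤ full := by rw [hfdef, Int.le_ediv_iff_mul_le (by omega)]; omega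
    -- Nat shadows of the parameters
    set S : Nat := s.toNat with hSdef
    set F : Nat := full.toNat with hFdef
    set R : Nat := rem.toNat with hRdef
    have hsS : s = (S : Int) := by omega
    have hfF : full = (F : Int) := by omega
    have hrR : rem = (R : Int) := by omega
    have hS2 : 2 ≤ S := by omega
    have hRS : R < S := by omega
    have hF2 : 2 ≤ F := by omega
    set T : Nat := if 2 ≤ R then R else 0 with hTdef
    set t1 : Nat := if 2 ≤ R then 1 else 0 with ht1def
    have hTS : T ≤ S := by rw [hTdef]; split_ifs <;> omega
    set U : Nat := F * S + T with hUdef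
    have hsf : s * full = ((F * S : Nat) : Int) := by rw [hsS, hfF]; push_cast; ring
    have hUint : (U : Int) = ((F * S : Nat) : Int) + (T : Int) := by rw [hUdef, Nat.cast_add]
    have husable : n - (if rem = 1 then 1 else 0) = (U : Int) := by
      rw [hUint, hTdef]
      split_ifs <;> omega
    rw [husable]
    -- the bucket count
    have hNR : (PySem.Int.floordiv ((U : Int) + s - 1) s).toNat = F + t1 := by
      rw [PySem.Int.floordiv_eq_ediv_of_pos (by omega : (0:Int) < s)]
      have hrw : (U : Int) + s - 1 = ((T : Int) + s - 1) + s * full := by omega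
      rw [hrw, Int.add_mul_ediv_left _ _ (by omega : s ≠ 0)]
      rw [ht1def, hTdef]
      by_cases h2 : 2 ≤ R
      · rw [if_pos h2, if_pos h2]
        have hrw2 : ((R : Int) : Int) + s - 1 = ((R : Int) - 1) + s * 1 := by omega
        rw [hrw2, Int.add_mul_ediv_left _ _ (by omega : s ≠ 0),
            Int.ediv_eq_zero_of_lt (by omega) (by omega)]
        omega
      · rw [if_neg h2, if_neg h2]
        rw [show ((0:Nat) : Int) + s - 1 = s - 1 from by push_cast; ring,
            Int.ediv_eq_zero_of_lt (by omega) (by omega)]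
        omega
    rw [hNR, hsS, fold_buckets S (F + t1) U]
    -- guard on the number of rows
    have hlenrows : PySem.List.len (rowsAt S (F + t1) U) = ((F + t1 : Nat) : Int) := by
      simp [rowsAt, PySem.List.len_eq]
    rw [hlenrows, if_pos (by push_cast; omega : (1:Int) < ((F + t1 : Nat) : Int))]
    -- the model rows
    have hrowF : ∀ r : Nat, r < F →
        ((List.range U).filter (fun g => g / S == r)).map (fun g => Int.ofNat g)
          = PySem.List.pyRange ((0 + (r:Int)) * (S:Int)) ((0 + (r:Int) + 1) * (S:Int)) 1 := by
      intro r hr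
      rw [hUdef, filter_div_block S (by omega) F T r hTS, if_pos hr,
          PySem.List.pyRange_one, List.map_map]
      rw [show (0 + (r:Int) + 1) * (S:Int) - (0 + (r:Int)) * (S:Int) = (S:Int) from by ring,
          Int.toNat_natCast]
      refine List.map_congr_left (fun j _ => ?_)
      simp only [Function.comp, Int.ofNat_eq_natCast]
      push_cast
      ring
    have hmodel0 : (List.range F).map (fun r =>
          ((List.range U).filter (fun g => g / S == r)).map (fun g => Int.ofNat g))
        = (PySem.List.pyRange 0 full 1).map (fun r => PySem.List.pyRange (r * (S:Int)) ((r + 1) * (S:Int)) 1) := by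
      rw [PySem.List.pyRange_one, List.map_map,
          show (full - 0).toNat = F from by omega]
      exact List.map_congr_left (fun r hr => by
        rw [hrowF r (List.mem_range.mp hr)]; rfl)
    have hrows : rowsAt S (F + t1) U
        = (PySem.List.pyRange 0 full 1).map (fun r => PySem.List.pyRange (r * (S:Int)) ((r + 1) * (S:Int)) 1)
          ++ (if 2 ≤ rem then [PySem.List.pyRange (full * (S:Int)) n 1] else []) := by
      unfold rowsAt
      by_cases h2 : 2 ≤ rem
      · have ht1 : t1 = 1 := by rw [ht1def, if_pos (by omega : 2 ≤ R)]
        have hT : T = R := by rw [hTdef, if_pos (by omega : 2 ≤ R)]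
        rw [ht1, List.range_succ, List.map_append, hmodel0, if_pos h2]
        congr 1
        rw [List.map_cons, List.map_nil]
        congr 1
        rw [hUdef, filter_div_block S (by omega) F T F hTS, if_neg (by omega), if_pos rfl,
            PySem.List.pyRange_one, List.map_map]
        rw [show n - full * (S:Int) = rem from by rw [show full * (S:Int) = s * full from by rw [hsS]; ring]; omega,
            show rem.toNat = T from by omega]
        refine List.map_congr_left (fun j _ => ?_)
        simp only [Function.comp, Int.ofNat_eq_natCast]
        rw [hfF]
        push_cast
        ring
      · have ht1 : t1 = 0 := by rw [ht1def, if_neg (by omega : ¬ 2 ≤ R)]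
        rw [ht1, Nat.add_zero, hmodel0, if_neg h2, List.append_nil]
    -- the data columns
    have hcol : ∀ p : Nat, p < S →
        ((List.range U).filter (fun g => g % S == p)).map (fun g => Int.ofNat g)
          = (List.range (F + if p < T then 1 else 0)).map (fun k => Int.ofNat (k * S + p)) := by
      intro p hp
      rw [hUdef, filter_mod_block S F T p hTS hp, List.map_map]
      rfl
    have hcollen : ∀ p : Nat, p < S →
        PySem.List.len (((List.range U).filter (fun g => g % S == p)).map (fun g => Int.ofNat g))
          = ((F + if p < T then 1 else 0 : Nat) : Int) := by
      intro p hp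
      rw [hcol p hp]
      simp [PySem.List.len_eq]
    have hdata : (colsAt S U).filter (fun c => decide (2 ≤ PySem.List.len c))
        = ((PySem.List.pyRange 0 (S:Int) 1).filter (fun pos =>
              decide (2 ≤ full + (if 2 ≤ rem ∧ pos < rem then (1 : Int) else 0)))).map (fun pos =>
            (PySem.List.pyRange 0 full 1).map (fun r => r * (S:Int) + pos) ++
              (if 2 ≤ rem ∧ pos < rem then [full * (S:Int) + pos] else [])) := by
      unfold colsAt
      rw [List.filter_map]
      rw [List.filter_congr (q := fun _ => true) (fun p hp => by
            simp only [Function.comp]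
            rw [hcollen p (List.mem_range.mp hp)]
            simp only [decide_eq_true_eq]
            push_cast
            omega), List.filter_true]
      rw [List.filter_congr (q := fun _ => true) (fun pos hmem => by
            obtain ⟨hp0, hps⟩ := (PySem.List.mem_pyRange_one).mp hmem
            simp only [decide_eq_true_eq]
            split_ifs <;> omega), List.filter_true]
      rw [PySem.List.pyRange_one 0 (S:Int), List.map_map,
          show ((S:Int) - 0).toNat = S from by omega]
      refine List.map_congr_left (fun p hp => ?_)
      have hpS : p < S := List.mem_range.mp hp
      rw [hcol p hpS]
      simp only [Function.comp]
      have hsplit : (2 ≤ rem ∧ 0 + (p:Int) < rem) ↔ p < T := by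
        rw [hTdef]
        by_cases h2 : 2 ≤ R
        · rw [if_pos h2]; omega
        · rw [if_neg h2]; omega
      by_cases hc : p < T
      · rw [if_pos (hsplit.mpr hc), if_pos hc, List.range_succ, List.map_append]
        congr 1
        · rw [PySem.List.pyRange_one, List.map_map,
              show (full - 0).toNat = F from by omega]
          refine List.map_congr_left (fun k _ => ?_)
          simp only [Function.comp, Int.ofNat_eq_natCast]
          push_cast
          ring
        · simp only [List.map_cons, List.map_nil, Int.ofNat_eq_natCast]
          congr 1
          rw [hfF]
          push_cast
          ring
      · rw [if_neg (fun h => hc (hsplit.mp h)), if_neg hc, List.append_nil]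
        rw [PySem.List.pyRange_one, List.map_map,
            show (full - 0).toNat = F from by omega]
        refine List.map_congr_left (fun k _ => ?_)
        simp only [Function.comp, Int.ofNat_eq_natCast]
        push_cast
        ring
    rw [hrows, hdata, if_pos (by split_ifs <;> omega : (1:Int) < full + (if 2 ≤ rem then 1 else 0))]
    by_cases h2 : 2 ≤ rem
    · simp [h2]
    · simp [h2]

-- ===== VERDICT (by name: the statement is the Claim_ definition above) =====
theorem create_hybrid_groups_py_spec : Claim_equal_create_hybrid_groups_py := by
  intro n _
  unfold Spec_create_hybrid_groups_py
  rw [a_eq_cf, b_eq_cf]
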